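-- pv_equiv track=rewrite | github.com/OFaaruuq/ESTITHMAR_GROUP_LCC | scripts/fix_migrations_after_deploy.py | _indent_block
-- ===== SOURCE A (Python) =====
-- def _indent_block(lines: list[str], start: int, stop: int, spaces: int = 4) -> list[str]:
--     pad = " " * spaces
--     out: list[str] = []
--     for i, line in enumerate(lines):
--         if start <= i < stop and line.strip():
--             out.append(pad + line)
--         else:
--             out.append(line)
--     return out
-- ===== SOURCE B (Python) =====
-- def _indent_block(lines: list[str], start: int, stop: int, spaces: int = 4) -> list[str]:
--     n = len(lines)
--     lo = min(max(start, 0), n)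
--     hi = min(max(stop, lo), n)
--     pad = " " * spaces
--     mid = [pad + l if l.strip() else l for l in lines[lo:hi]]
--     return lines[:lo] + mid + lines[hi:]
-- ===== Notes on version B (the rewrite author's own statement) =====
-- stated objective: alternative
-- what changed: Replaces A's single pass that tests start <= i < stop on every index with a slice-based three-segment decomposition: clamp lo/hi once, keep lines[:lo] and lines[hi:] untouched, and transform only the middle slice with no index test inside the loop.
import Mathlib
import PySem

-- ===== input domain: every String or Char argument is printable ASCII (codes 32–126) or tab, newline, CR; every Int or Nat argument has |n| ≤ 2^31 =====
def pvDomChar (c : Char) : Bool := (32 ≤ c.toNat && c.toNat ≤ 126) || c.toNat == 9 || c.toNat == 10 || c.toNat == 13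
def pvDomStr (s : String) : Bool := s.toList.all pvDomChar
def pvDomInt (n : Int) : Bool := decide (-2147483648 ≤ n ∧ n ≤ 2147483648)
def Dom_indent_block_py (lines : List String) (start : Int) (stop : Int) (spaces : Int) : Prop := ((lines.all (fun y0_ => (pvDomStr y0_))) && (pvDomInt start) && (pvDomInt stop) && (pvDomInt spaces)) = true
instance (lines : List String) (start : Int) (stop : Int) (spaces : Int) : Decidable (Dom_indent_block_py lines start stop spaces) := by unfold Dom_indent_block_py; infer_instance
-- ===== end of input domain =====

-- B replaces A's per-element index test with a slice-based three-segment decomposition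
-- (prefix unchanged, clamped middle slice transformed, suffix unchanged); objective: alternative.

-- ===== PORT A =====
-- the for-enumerate loop of A, index carried explicitly
def indentGoA (pad : String) (start stop : Int) (i : Int) : List String → List String
  | [] => []
  | l :: ls =>
      (if start ≤ i ∧ i < stop ∧ PySem.Str.strip l ≠ "" then pad ++ l else l)
        :: indentGoA pad start stop (i + 1) ls

def indent_block_py (lines : List String) (start : Int) (stop : Int) (spaces : Int) : List String :=
  let pad := String.ofList (List.replicate spaces.toNat ' ')   -- " " * spaces (negative → "")
  indentGoA pad start stop 0 lines

-- ===== PORT B =====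
def indent_block_py_alt (lines : List String) (start : Int) (stop : Int) (spaces : Int) : List String :=
  let n : Int := lines.length
  let lo : Int := min (max start 0) n
  let hi : Int := min (max stop lo) n
  let pad := String.ofList (List.replicate spaces.toNat ' ')
  lines.take lo.toNat
    ++ ((lines.drop lo.toNat).take (hi - lo).toNat).map
         (fun l => if PySem.Str.strip l ≠ "" then pad ++ l else l)
    ++ lines.drop hi.toNat

-- ===== PRECONDITION & SPEC =====
def Spec_indent_block_py (lines : List String) (start : Int) (stop : Int) (spaces : Int) (out : List String) : Prop := out = indent_block_py_alt lines start stop spaces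
instance (lines : List String) (start : Int) (stop : Int) (spaces : Int) (out : List String) : Decidable (Spec_indent_block_py lines start stop spaces out) := by unfold Spec_indent_block_py; infer_instance

-- ===== CLAIM (what is proved, stated in full; the proofs are below) =====
def Claim_equal_indent_block_py : Prop := ∀ (lines : List String) (start : Int) (stop : Int) (spaces : Int), Dom_indent_block_py lines start stop spaces → Spec_indent_block_py lines start stop spaces (indent_block_py lines start stop spaces)

-- ===== LEMMAS AND PROOFS =====

theorem indentGoA_length (pad : String) (s t i : Int) (ls : List String) :
    (indentGoA pad s t i ls).length = ls.length := by
  induction ls generalizing i with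
  | nil => simp [indentGoA]
  | cons l ls ih => simp [indentGoA, ih]

theorem indentGoA_getElem (pad : String) (s t i : Int) (ls : List String) (j : Nat)
    (h : j < ls.length) :
    (indentGoA pad s t i ls)[j]'(by rw [indentGoA_length]; exact h) =
      (if s ≤ i + (j : Int) ∧ i + (j : Int) < t ∧ PySem.Str.strip ls[j] ≠ "" then pad ++ ls[j]
       else ls[j]) := by
  induction ls generalizing i j with
  | nil => simp at h
  | cons l ls ih =>
      cases j with
      | zero => simp [indentGoA]
      | succ j =>
          have h' : j < ls.length := by simpa using h
          have := ih (i + 1) j h'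
          simp only [indentGoA, List.getElem_cons_succ]
          rw [this]
          have : i + 1 + (j : Int) = i + ((j : Nat) + 1 : Int) := by omega
          simp [this]

theorem indent_block_py_eq_alt (lines : List String) (s t sp : Int) :
    indent_block_py lines s t sp = indent_block_py_alt lines s t sp := by
  simp only [indent_block_py, indent_block_py_alt]
  set pad := String.ofList (List.replicate sp.toNat ' ') with hpad
  set n : Int := (lines.length : Int) with hn
  set lo : Int := min (max s 0) n with hlo
  set hi : Int := min (max t lo) n with hhi
  have h0n : 0 ≤ n := by positivity
  have hlo0 : 0 ≤ lo := by omega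
  have hlon : lo ≤ n := by omega
  have hlohi : lo ≤ hi := by omega
  have hhin : hi ≤ n := by omega
  have hlen : ((lines.drop lo.toNat).take (hi - lo).toNat).length = hi.toNat - lo.toNat := by
    simp [List.length_take, List.length_drop]
    omega
  apply List.ext_getElem
  · rw [indentGoA_length]
    simp [List.length_append, List.length_take, List.length_drop]
    omega
  · intro j h1 h2
    have hjlen : j < lines.length := by rw [indentGoA_length] at h1; exact h1
    rw [indentGoA_getElem pad s t 0 lines j (by simpa [indentGoA_length] using h1)]
    rw [List.getElem_append]
    by_cases hj1 : j < lo.toNat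
    · -- prefix: condition is false since j < s
      rw [dif_pos (by simp [List.length_take, List.length_map]; omega)]
      rw [List.getElem_append]
      rw [dif_pos (by simp [List.length_take]; omega)]
      rw [List.getElem_take]
      have : ¬ (s ≤ 0 + (j : Int) ∧ 0 + (j : Int) < t ∧ PySem.Str.strip lines[j] ≠ "") := by
        rintro ⟨h1', _, _⟩; omega
      rw [if_neg this]
    · by_cases hj2 : j < hi.toNat
      · -- middle
        rw [dif_pos (by simp [List.length_take, List.length_map]; omega)]
        rw [List.getElem_append]
        rw [dif_neg (by simp [List.length_take]; omega)]
        rw [List.getElem_map]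
        rw [List.getElem_take, List.getElem_drop]
        have hj' : lo.toNat + (j - (List.take lo.toNat lines).length) = j := by
          simp [List.length_take]; omega
        have hc1 : s ≤ 0 + (j : Int) := by omega
        have hc2 : 0 + (j : Int) < t := by omega
        simp only [hj']
        by_cases hstr : PySem.Str.strip lines[j] ≠ ""
        · rw [if_pos ⟨hc1, hc2, hstr⟩, if_pos hstr]
        · rw [if_neg (by tauto), if_neg hstr]
      · -- suffix: condition is false since j ≥ t (or j ≥ n)
        rw [dif_neg (by simp [List.length_take, List.length_map]; omega)]
        rw [List.getElem_drop]
        have hj' : hi.toNat + (j - (List.take lo.toNat lines ++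
            (List.take (hi - lo).toNat (List.drop lo.toNat lines)).map
              (fun l => if PySem.Str.strip l ≠ "" then pad ++ l else l)).length) = j := by
          simp [List.length_take, List.length_map]; omega
        have : ¬ (s ≤ 0 + (j : Int) ∧ 0 + (j : Int) < t ∧ PySem.Str.strip lines[j] ≠ "") := by
          rintro ⟨_, h2', _⟩
          have hjn : (j : Int) < n := by omega
          omega
        simp only [hj']
        rw [if_neg this]

-- ===== VERDICT (by name: the statement is the Claim_ definition above) =====
theorem indent_block_py_spec : Claim_equal_indent_block_py := by
  intro lines s t sp _
  exact indent_block_py_eq_alt lines s t sp
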